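-- pv_equiv track=rewrite | github.com/Garrett-R/infections | infections.py | _find_max_left_justified_subarray
-- ===== SOURCE A (Python) =====
-- def _find_max_left_justified_subarray(array):
--     '''return number of elements to keep in order to maximize the subarray
--     which is constrained to start at the first element.'''
--     subarray_length = 0
--     max_sum = 0
--     for ii in range(len(array)):
--         current_sum = sum(array[:ii+1])
--         if current_sum > max_sum:
--             max_sum = current_sum
--             subarray_length = ii + 1
--     return subarray_length
-- ===== SOURCE B (Python) =====
-- def _find_max_left_justified_subarray(array):
--     '''return number of elements to keep in order to maximize the subarray
--     which is constrained to start at the first element.'''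
--     best_len = 0
--     best_sum = 0
--     running = 0
--     for i, x in enumerate(array):
--         running += x
--         if running > best_sum:
--             best_sum = running
--             best_len = i + 1
--     return best_len
-- ===== Notes on version B (the rewrite author's own statement) =====
-- stated objective: faster
-- what changed: B keeps a running prefix sum in a single pass instead of recomputing sum(array[:ii+1]) from scratch at every index.
import Mathlib
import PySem

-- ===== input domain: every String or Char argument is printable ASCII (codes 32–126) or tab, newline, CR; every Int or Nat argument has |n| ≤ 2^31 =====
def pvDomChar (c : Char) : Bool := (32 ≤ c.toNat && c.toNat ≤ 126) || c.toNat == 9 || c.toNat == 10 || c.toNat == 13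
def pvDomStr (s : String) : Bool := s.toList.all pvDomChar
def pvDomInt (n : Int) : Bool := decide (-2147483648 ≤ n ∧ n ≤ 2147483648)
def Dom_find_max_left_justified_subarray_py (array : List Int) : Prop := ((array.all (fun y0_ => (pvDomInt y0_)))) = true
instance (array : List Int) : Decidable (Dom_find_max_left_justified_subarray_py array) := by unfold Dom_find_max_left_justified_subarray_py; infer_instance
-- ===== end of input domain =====

-- B replaces A's per-index sum(array[:ii+1]) rescans by a single pass with a running prefix sum (faster, asymptotic).

-- ===== PORT A =====
-- loop body: current_sum = sum(array[:ii+1]); if current_sum > max_sum: update.  state = (subarray_length, max_sum)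
def pvAstep (array : List Int) (st : Int × Int) (ii : Int) : Int × Int :=
  let current_sum := (PySem.List.slice array none (some (ii + 1))).sum
  if current_sum > st.2 then (ii + 1, current_sum) else st

def find_max_left_justified_subarray_py (array : List Int) : Int :=
  ((PySem.List.pyRange 0 (array.length : Int) 1).foldl (pvAstep array) (0, 0)).1

-- ===== PORT B =====
-- loop body over enumerate(array): running += x; if running > best_sum: update.  state = (best_len, best_sum, running)
def pvBstep (st : Int × Int × Int) (p : Int × Int) : Int × Int × Int :=
  let running := st.2.2 + p.2
  if running > st.2.1 then (p.1 + 1, running, running) else (st.1, st.2.1, running)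

def find_max_left_justified_subarray_py_alt (array : List Int) : Int :=
  ((PySem.List.enumerate array 0).foldl pvBstep (0, 0, 0)).1

-- ===== PRECONDITION & SPEC =====
def Spec_find_max_left_justified_subarray_py (array : List Int) (out : Int) : Prop := out = find_max_left_justified_subarray_py_alt array
instance (array : List Int) (out : Int) : Decidable (Spec_find_max_left_justified_subarray_py array out) := by unfold Spec_find_max_left_justified_subarray_py; infer_instance

-- ===== CLAIM (what is proved, stated in full; the proofs are below) =====
def Claim_equal_find_max_left_justified_subarray_py : Prop := ∀ (array : List Int), Dom_find_max_left_justified_subarray_py array → Spec_find_max_left_justified_subarray_py array (find_max_left_justified_subarray_py array)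

-- ===== LEMMAS AND PROOFS =====

-- invariant: A's fold state is B's (best_len, best_sum), and B's running component is the total sum
theorem pv_key (arr : List Int) :
    (PySem.List.pyRange 0 (arr.length : Int) 1).foldl (pvAstep arr) (0, 0)
      = ((((PySem.List.enumerate arr 0).foldl pvBstep (0, 0, 0)).1,
          ((PySem.List.enumerate arr 0).foldl pvBstep (0, 0, 0)).2.1))
    ∧ ((PySem.List.enumerate arr 0).foldl pvBstep (0, 0, 0)).2.2 = arr.sum := by
  induction arr using List.reverseRecOn with
  | nil => constructor <;> rfl
  | append_singleton arr x ih =>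
    obtain ⟨ihA, ihS⟩ := ih
    have hn : ((arr ++ [x]).length : Int) = (arr.length : Int) + 1 := by
      simp
    have hrange : PySem.List.pyRange 0 ((arr ++ [x]).length : Int) 1
        = PySem.List.pyRange 0 (arr.length : Int) 1 ++ [(arr.length : Int)] := by
      rw [hn, PySem.List.pyRange_one_succ_right (by positivity)]
    have henum : PySem.List.enumerate (arr ++ [x]) 0
        = PySem.List.enumerate arr 0 ++ [((arr.length : Int), x)] := by
      rw [PySem.List.enumerate_append]
      simp [PySem.List.enumerate]
    -- on indices < arr.length the slice of arr ++ [x] is the slice of arr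
    have hcongr : (PySem.List.pyRange 0 (arr.length : Int) 1).foldl (pvAstep (arr ++ [x])) (0, 0)
        = (PySem.List.pyRange 0 (arr.length : Int) 1).foldl (pvAstep arr) (0, 0) := by
      apply PySem.List.foldl_congr_mem
      intro acc ii hii
      rw [PySem.List.mem_pyRange_one] at hii
      unfold pvAstep
      have h0 : (0 : Int) ≤ ii + 1 := by omega
      rw [PySem.List.slice_to _ h0, PySem.List.slice_to _ h0,
        List.take_append_of_le_length (by omega)]
    have hlast : (PySem.List.slice (arr ++ [x]) none (some ((arr.length : Int) + 1))).sum
        = arr.sum + x := by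
      rw [PySem.List.slice_to _ (by positivity)]
      have : ((arr.length : Int) + 1).toNat = arr.length + 1 := by omega
      rw [this, List.take_of_length_le (by simp)]
      simp
    set b := List.foldl pvBstep (0, 0, 0) (PySem.List.enumerate arr 0) with hb
    constructor
    · rw [hrange, List.foldl_append, hcongr, ihA, henum, List.foldl_append,
        List.foldl_cons, List.foldl_nil]
      show pvAstep (arr ++ [x]) (b.1, b.2.1) ((arr.length : Int))
          = ((pvBstep b ((arr.length : Int), x)).1, (pvBstep b ((arr.length : Int), x)).2.1)
      unfold pvAstep pvBstep
      simp only [ihS, hlast]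
      split_ifs <;> rfl
    · rw [henum, List.foldl_append, List.foldl_cons, List.foldl_nil]
      show (pvBstep b ((arr.length : Int), x)).2.2 = (arr ++ [x]).sum
      simp only [pvBstep, ihS]
      split_ifs <;> simp

-- ===== VERDICT (by name: the statement is the Claim_ definition above) =====
theorem find_max_left_justified_subarray_py_spec : Claim_equal_find_max_left_justified_subarray_py := by
  intro array _
  unfold Spec_find_max_left_justified_subarray_py
  unfold find_max_left_justified_subarray_py find_max_left_justified_subarray_py_alt
  rw [(pv_key array).1]
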